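-- pv_equiv track=rewrite | github.com/microsoft/project-azua | azua/datasets/data_processor.py | _split_contiguous_sublists
-- ===== SOURCE A (Python) =====
-- from typing import Tuple, List, overload, Union, Optional
--
-- def _split_contiguous_sublists(ints: List[int]) -> List[List[int]]:
--     """
--     Map from list of ints to list of contiguous sublists. E.g. [1,2,4,6,7] -> [[1,2],[4],[6,7]]. Assumes input list
--     is sorted.
--     """
--     out: List[List[int]] = []
--     for i in ints:
--         if len(out) == 0:
--             out.append([i])
--         elif i == out[-1][-1] + 1:
--             out[-1].append(i)
--         else:
--             out.append([i])
--     return out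
-- ===== SOURCE B (Python) =====
-- from itertools import groupby
-- from typing import List
--
-- def _split_contiguous_sublists(ints: List[int]) -> List[List[int]]:
--     """Group ints into contiguous runs via groupby on value-minus-index."""
--     return [
--         [value for _, value in group]
--         for _, group in groupby(enumerate(ints), key=lambda pair: pair[1] - pair[0])
--     ]
-- ===== Notes on version B (the rewrite author's own statement) =====
-- stated objective: idiomatic
-- what changed: Replaced the running last-element adjacency check with an itertools.groupby over enumerate(ints) keyed by value-minus-index, so each contiguous run is one group.
import Mathlib
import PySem

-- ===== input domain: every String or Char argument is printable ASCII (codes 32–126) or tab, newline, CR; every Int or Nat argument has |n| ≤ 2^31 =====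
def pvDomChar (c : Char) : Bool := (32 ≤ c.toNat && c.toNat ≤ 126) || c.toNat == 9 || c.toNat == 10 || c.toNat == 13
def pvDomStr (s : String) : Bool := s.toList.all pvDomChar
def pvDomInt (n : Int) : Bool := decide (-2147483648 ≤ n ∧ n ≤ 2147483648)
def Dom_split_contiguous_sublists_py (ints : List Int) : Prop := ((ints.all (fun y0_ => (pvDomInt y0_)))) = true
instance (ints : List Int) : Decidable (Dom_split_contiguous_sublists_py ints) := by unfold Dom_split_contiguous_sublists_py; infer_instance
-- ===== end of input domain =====

-- B replaces A's running last-element adjacency check with a groupby over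
-- enumerate(ints) keyed by value-minus-index (idiomatic itertools grouping).


-- ===== PORT A =====
-- one loop-body step of A: append new singleton run, or extend the last run
def pvStepA (out : List (List Int)) (i : Int) : List (List Int) :=
  if out.length = 0 then out ++ [[i]]
  else if i = (out.getLast!).getLast! + 1 then out.dropLast ++ [out.getLast! ++ [i]]
  else out ++ [[i]]

def split_contiguous_sublists_py (ints : List Int) : List (List Int) :=
  ints.foldl pvStepA []

-- ===== PORT B =====
-- itertools.groupby over the enumerated pairs, key = value - index:
-- cur holds the current group's pairs in reverse (accumulated front-to-back)
def pvGroupby (key : Int) (cur : List (Int × Int)) : List (Int × Int) → List (List (Int × Int))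
  | [] => [cur.reverse]
  | p :: ps =>
      if p.2 - p.1 = key then pvGroupby key (p :: cur) ps
      else cur.reverse :: pvGroupby (p.2 - p.1) [p] ps

def split_contiguous_sublists_py_alt (ints : List Int) : List (List Int) :=
  match PySem.List.enumerate ints 0 with
  | [] => []
  | p :: ps => (pvGroupby (p.2 - p.1) [p] ps).map (fun g => g.map (·.2))

-- ===== PRECONDITION & SPEC =====
def Spec_split_contiguous_sublists_py (ints : List Int) (out : List (List Int)) : Prop := out = split_contiguous_sublists_py_alt ints
instance (ints : List Int) (out : List (List Int)) : Decidable (Spec_split_contiguous_sublists_py ints out) := by unfold Spec_split_contiguous_sublists_py; infer_instance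

-- ===== CLAIM (what is proved, stated in full; the proofs are below) =====
def Claim_equal_split_contiguous_sublists_py : Prop := ∀ (ints : List Int), Dom_split_contiguous_sublists_py ints → Spec_split_contiguous_sublists_py ints (split_contiguous_sublists_py ints)

-- ===== LEMMAS AND PROOFS =====

-- common reference recursion: current run `c` (nonempty) with last element `last`
def pvRuns (c : List Int) (last : Int) : List Int → List (List Int)
  | [] => [c]
  | x :: xs => if x = last + 1 then pvRuns (c ++ [x]) x xs else c :: pvRuns [x] x xs

theorem pvGetLast!_bang {α : Type} [Inhabited α] (l : List α) : l.getLast! = l.getLast?.get! := by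
  cases l with
  | nil => rfl
  | cons x xs => simp [List.getLast!, List.getLast?_eq_some_getLast]

theorem pvGetLast!_concat {α : Type} [Inhabited α] (l : List α) (a : α) : (l ++ [a]).getLast! = a := by
  rw [pvGetLast!_bang]; simp

theorem pvFoldlA_eq (xs : List Int) : ∀ (pre : List (List Int)) (c : List Int) (last : Int),
    c.getLast! = last →
    List.foldl pvStepA (pre ++ [c]) xs = pre ++ pvRuns c last xs := by
  induction xs with
  | nil => intro pre c last _; simp [pvRuns]
  | cons x xs ih =>
    intro pre c last hl
    have hlast : (pre ++ [c]).getLast! = c := pvGetLast!_concat pre c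
    have hdrop : (pre ++ [c]).dropLast = pre := by simp
    simp only [List.foldl_cons, pvStepA, hlast, hdrop, hl]
    have hne : ¬ (pre ++ [c]).length = 0 := by simp
    rw [if_neg hne]
    by_cases hx : x = last + 1
    · rw [if_pos hx]
      rw [ih pre (c ++ [x]) x (pvGetLast!_concat c x)]
      simp [pvRuns, hx]
    · rw [if_neg hx]
      have happ : pre ++ [c] ++ [[x]] = (pre ++ [c]) ++ [[x]] := by simp
      rw [happ, ih (pre ++ [c]) [x] x rfl]
      simp [pvRuns, hx]

theorem pvGroupby_eq (xs : List Int) : ∀ (n last : Int) (cur : List (Int × Int)),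
    (pvGroupby (last - n) cur (PySem.List.enumerate xs (n + 1))).map (fun g => g.map (·.2))
      = pvRuns (cur.reverse.map (·.2)) last xs := by
  induction xs with
  | nil => intro n last cur; simp [PySem.List.enumerate_nil, pvGroupby, pvRuns]
  | cons x xs ih =>
    intro n last cur
    rw [PySem.List.enumerate_cons]
    simp only [pvGroupby]
    by_cases hx : x = last + 1
    · have hk : x - (n + 1) = last - n := by omega
      rw [if_pos hk, ← hk, ih (n + 1) x ((n + 1, x) :: cur)]
      simp [pvRuns, hx]
    · have hk : ¬ (x - (n + 1) = last - n) := by omega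
      rw [if_neg hk]
      simp only [List.map_cons]
      rw [ih (n + 1) x [(n + 1, x)]]
      simp [pvRuns, hx]

-- ===== VERDICT (by name: the statement is the Claim_ definition above) =====
theorem split_contiguous_sublists_py_spec : Claim_equal_split_contiguous_sublists_py := by
  intro ints _
  unfold Spec_split_contiguous_sublists_py split_contiguous_sublists_py split_contiguous_sublists_py_alt
  cases ints with
  | nil => simp [PySem.List.enumerate_nil]
  | cons x xs =>
    rw [PySem.List.enumerate_cons]
    have hA : List.foldl pvStepA [] (x :: xs) = ([] : List (List Int)) ++ pvRuns [x] x xs := by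
      have h0 : List.foldl pvStepA [] (x :: xs) = List.foldl pvStepA ([] ++ [[x]]) xs := by
        simp [List.foldl_cons, pvStepA]
      rw [h0]
      exact pvFoldlA_eq xs [] [x] x rfl
    have hB := pvGroupby_eq xs 0 x [(0, x)]
    simp only [List.nil_append] at hA
    simp only [List.reverse_cons, List.reverse_nil, List.nil_append, List.map_cons,
      List.map_nil] at hB
    rw [hA]
    simpa using hB.symm
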